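-- pv_equiv track=rewrite | github.com/araghukas/nwlattice | nwlattice2/nw.py | get_plane_index
-- ===== SOURCE A (Python) =====
-- def get_plane_index(nz: int, q: int) -> set:
--     index = []
--     include = True
--     for i in range(nz):
--         if i % q == 0:
--             include = not include
--         if include:
--             index.append(i)
--     return set(index)
-- ===== SOURCE B (Python) =====
-- def get_plane_index(nz: int, q: int) -> set:
--     return {i for i in range(nz) if (i // abs(q)) % 2 == 1}
-- ===== Notes on version B (the rewrite author's own statement) =====
-- stated objective: simpler
-- what changed: Replaced A's stateful include-toggle loop and list accumulator with a one-line set comprehension that tests block parity directly via (i // abs(q)) % 2 == 1.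
import Mathlib
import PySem

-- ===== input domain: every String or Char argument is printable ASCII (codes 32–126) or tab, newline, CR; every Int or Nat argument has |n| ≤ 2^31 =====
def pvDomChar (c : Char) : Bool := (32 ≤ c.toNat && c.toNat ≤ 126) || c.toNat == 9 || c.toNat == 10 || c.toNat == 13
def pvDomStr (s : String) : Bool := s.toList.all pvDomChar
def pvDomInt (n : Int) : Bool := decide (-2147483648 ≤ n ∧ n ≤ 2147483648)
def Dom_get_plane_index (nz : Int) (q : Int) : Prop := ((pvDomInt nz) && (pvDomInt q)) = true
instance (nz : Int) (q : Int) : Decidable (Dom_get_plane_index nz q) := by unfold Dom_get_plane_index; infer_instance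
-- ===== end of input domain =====

-- B replaces A's stateful include-toggle loop with a direct block-parity test
-- (i is included iff (i // |q|) % 2 == 1); objective: simpler.

-- ===== PORT A =====
-- literal port: fold over range(nz) carrying (index, include); at the end set(index)
def get_plane_index (nz : Int) (q : Int) : List Int :=
  let st := (PySem.List.pyRange 0 nz 1).foldl
    (fun (s : List Int × Bool) i =>
      let include_ := if PySem.Int.mod i q = 0 then !s.2 else s.2
      (if include_ then s.1 ++ [i] else s.1, include_))
    ([], true)
  PySem.Set.ofList st.1

-- ===== PORT B =====
-- literal port of Source B: {i for i in range(nz) if (i // abs(q)) % 2 == 1}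
def get_plane_index_alt (nz : Int) (q : Int) : List Int :=
  PySem.Set.ofList ((PySem.List.pyRange 0 nz 1).filter
    (fun i => PySem.Int.mod (PySem.Int.floordiv i |q|) 2 == 1))

-- ===== PRECONDITION & SPEC =====
-- Pre_ excludes exactly the inputs where Python A raises ZeroDivisionError (q = 0 with nz ≥ 1).
def Pre_get_plane_index (nz : Int) (q : Int) : Prop := q ≠ 0 ∨ nz ≤ 0
instance (nz : Int) (q : Int) : Decidable (Pre_get_plane_index nz q) := by unfold Pre_get_plane_index; infer_instance
def pvWitness_get_plane_index : Int × Int := (7, 2)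

def Spec_get_plane_index (nz : Int) (q : Int) (out : List Int) : Prop := out = get_plane_index_alt nz q
instance (nz : Int) (q : Int) (out : List Int) : Decidable (Spec_get_plane_index nz q out) := by unfold Spec_get_plane_index; infer_instance

-- ===== CLAIM (what is proved, stated in full; the proofs are below) =====
def Claim_equal_get_plane_index : Prop := ∀ (nz : Int) (q : Int), Dom_get_plane_index nz q → Pre_get_plane_index nz q → Spec_get_plane_index nz q (get_plane_index nz q)

-- ===== LEMMAS AND PROOFS =====

-- B's membership predicate (the block-parity test), used only by the proofs
def pvPred (q : Int) (i : Int) : Bool :=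
  PySem.Int.mod (PySem.Int.floordiv i |q|) 2 == 1

-- floor division of i by b > 0 steps up by 1 exactly at multiples of b
lemma pvFloordiv_step (b i : Int) (hb : 0 < b) (_hi : 0 < i) :
    PySem.Int.floordiv i b =
      PySem.Int.floordiv (i - 1) b + (if b ∣ i then 1 else 0) := by
  have hk := (PySem.Int.floordiv_eq_iff_of_pos (a := i - 1) (b := b)
    (q := PySem.Int.floordiv (i - 1) b) hb).mp rfl
  obtain ⟨h1, h2⟩ := hk
  set k := PySem.Int.floordiv (i - 1) b with hkdef
  by_cases hd : b ∣ i
  · rw [if_pos hd]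
    obtain ⟨m, hm⟩ := hd
    rw [PySem.Int.floordiv_eq_iff_of_pos hb]
    have hkm : k < m := by
      by_contra h
      have : b * m ≤ b * k := mul_le_mul_of_nonneg_left (by omega) (le_of_lt hb)
      nlinarith
    constructor
    · have : k + 1 ≤ m := hkm
      calc (k + 1) * b ≤ m * b := by
            exact mul_le_mul_of_nonneg_right this (le_of_lt hb)
        _ = i := by rw [hm]; ring
    · nlinarith
  · simp only [hd, if_neg, not_false_iff, add_zero]
    rw [PySem.Int.floordiv_eq_iff_of_pos hb]
    constructor
    · linarith
    · have hle : i ≤ (k + 1) * b := by linarith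
      rcases lt_or_eq_of_le hle with h | h
      · exact h
      · exfalso; exact hd ⟨k + 1, by rw [h]; ring⟩

-- the running include flag equals the parity predicate at each step
lemma pvStep_pred (q i : Int) (hq : q ≠ 0) (hi : 0 ≤ i) :
    (if PySem.Int.mod i q = 0 then !(if i = 0 then true else pvPred q (i - 1))
     else (if i = 0 then true else pvPred q (i - 1))) = pvPred q i := by
  have hb : 0 < |q| := abs_pos.mpr hq
  have hmodiff : (PySem.Int.mod i q = 0) ↔ (|q| ∣ i) := by
    rw [PySem.Int.mod_eq_zero_iff_dvd, abs_dvd]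
  by_cases hz : i = 0
  · subst hz
    have hm0 : PySem.Int.mod 0 q = 0 := (hmodiff).mpr (dvd_zero _)
    have h0 : PySem.Int.floordiv 0 |q| = 0 := by
      rw [PySem.Int.floordiv_eq_iff_of_pos hb]; constructor <;> simp [hb]
    have h2 : PySem.Int.mod (0 : Int) 2 = 0 % 2 := PySem.Int.mod_eq_emod_of_pos (by norm_num)
    simp [pvPred, hm0, h0]
  · have hipos : 0 < i := lt_of_le_of_ne hi (Ne.symm hz)
    have hstep := pvFloordiv_step |q| i hb hipos
    simp only [hz, if_neg, not_false_iff]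
    set k := PySem.Int.floordiv (i - 1) |q| with hkdef
    have hmk : PySem.Int.mod k 2 = k % 2 := PySem.Int.mod_eq_emod_of_pos (by norm_num)
    have hmk1 : PySem.Int.mod (k + 1) 2 = (k + 1) % 2 :=
      PySem.Int.mod_eq_emod_of_pos (by norm_num)
    by_cases hd : |q| ∣ i
    · have : PySem.Int.mod i q = 0 := hmodiff.mpr hd
      simp only [this, if_pos]
      simp only [pvPred, hstep, hd, if_pos, ← hkdef]
      rw [hmk, hmk1]
      rcases Int.emod_two_eq k with h | h <;> simp [h] <;> omega
    · have : ¬ PySem.Int.mod i q = 0 := fun h => hd (hmodiff.mp h)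
      simp only [this, if_neg, not_false_iff]
      simp [pvPred, hstep, hd, ← hkdef]

-- loop invariant for A's fold over range(n)
lemma pvLoop_inv (q : Int) (hq : q ≠ 0) (n : Nat) :
    (PySem.List.pyRange 0 n 1).foldl
      (fun (s : List Int × Bool) i =>
        let include_ := if PySem.Int.mod i q = 0 then !s.2 else s.2
        (if include_ then s.1 ++ [i] else s.1, include_))
      ([], true)
    = ((PySem.List.pyRange 0 n 1).filter (pvPred q),
       if (n : Int) = 0 then true else pvPred q ((n : Int) - 1)) := by
  induction n with
  | zero => simp
  | succ m ih =>
    have hsplit : PySem.List.pyRange 0 ((m : Int) + 1) 1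
        = PySem.List.pyRange 0 (m : Int) 1 ++ [(m : Int)] :=
      PySem.List.pyRange_one_succ_right (by positivity)
    have hcast : ((m + 1 : Nat) : Int) = (m : Int) + 1 := by push_cast; ring
    rw [hcast, hsplit, List.foldl_append, List.filter_append, ih]
    have hinc := pvStep_pred q (m : Int) hq (by positivity)
    have hne : ¬ ((m : Int) + 1 = 0) := by omega
    have hsub : (m : Int) + 1 - 1 = (m : Int) := by ring
    simp only [List.foldl_cons, List.foldl_nil, List.filter_cons, List.filter_nil]
    rw [hinc, if_neg hne, hsub]
    rcases pvPred q (m : Int) with _ | _ <;> simp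

-- ===== VERDICT (by name: the statement is the Claim_ definition above) =====
theorem get_plane_index_spec : Claim_equal_get_plane_index := by
  intro nz q _ hpre
  unfold Spec_get_plane_index get_plane_index get_plane_index_alt
  by_cases hnz : nz ≤ 0
  · rw [PySem.List.pyRange_one_eq_nil (by omega)]
    simp
  · have hq : q ≠ 0 := by
      rcases hpre with h | h
      · exact h
      · omega
    have hnz' : nz = ((nz.toNat : Nat) : Int) := by omega
    rw [hnz', pvLoop_inv q hq nz.toNat]
    rfl
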